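-- pv_equiv track=rewrite | github.com/joriswex/WOO_organizer | evaluate_pss.py | labels_to_segments
-- ===== SOURCE A (Python) =====
-- from typing import List, Tuple, Dict
--
-- def labels_to_segments(labels: List[int]) -> List[Tuple[int, int]]:
--     """
--     Convert a per-page label list to a list of (start, end) page index tuples
--     (inclusive), representing individual documents within the stream.
--
--     Example:
--         [1, 0, 0, 1, 0, 1]  →  [(0,2), (3,4), (5,5)]
--     """
--     segments = []
--     start = 0
--     for i in range(1, len(labels)):
--         if labels[i] == 1:
--             segments.append((start, i - 1))
--             start = i
--     segments.append((start, len(labels) - 1))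
--     return segments
-- ===== SOURCE B (Python) =====
-- def labels_to_segments(labels):
--     n = len(labels)
--     starts = [0] + [i for i in range(1, n) if labels[i] == 1]
--     return [(s, t - 1) for s, t in zip(starts, starts[1:] + [n])]
-- ===== Notes on version B (the rewrite author's own statement) =====
-- stated objective: alternative
-- what changed: Replaces A's single accumulator loop (carrying segments and a running start) by a boundary-index decomposition: first collect the list of segment start indices, then pair consecutive starts (zip with the shifted list plus the length sentinel) to form the (start, end) tuples.
import Mathlib
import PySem

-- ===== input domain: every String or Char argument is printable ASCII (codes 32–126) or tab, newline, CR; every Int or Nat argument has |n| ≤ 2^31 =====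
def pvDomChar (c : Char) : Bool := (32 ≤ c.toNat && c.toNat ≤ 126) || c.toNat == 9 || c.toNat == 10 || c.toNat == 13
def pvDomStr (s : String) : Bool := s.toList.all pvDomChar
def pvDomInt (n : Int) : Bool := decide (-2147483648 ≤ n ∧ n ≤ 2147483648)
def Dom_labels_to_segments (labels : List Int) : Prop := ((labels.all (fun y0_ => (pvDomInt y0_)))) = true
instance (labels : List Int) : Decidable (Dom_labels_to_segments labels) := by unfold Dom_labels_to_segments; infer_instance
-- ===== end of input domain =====

-- B replaces A's accumulator loop by a boundary-index decomposition (collect start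
-- indices, then pair consecutive starts); objective: alternative, same cost.

-- ===== PORT A =====
def labels_to_segments (labels : List Int) : List (Int × Int) :=
  let n : Int := labels.length
  let p := (PySem.List.pyRange 1 n 1).foldl
    (fun (st : List (Int × Int) × Int) i =>
      if PySem.List.pyGet? labels i == some 1 then (st.1 ++ [(st.2, i - 1)], i) else st)
    ([], 0)
  p.1 ++ [(p.2, n - 1)]

-- ===== PORT B =====
def labels_to_segments_alt (labels : List Int) : List (Int × Int) :=
  let n : Int := labels.length
  let starts : List Int :=
    0 :: (PySem.List.pyRange 1 n 1).filter (fun i => PySem.List.pyGet? labels i == some 1)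
  (starts.zip (starts.drop 1 ++ [n])).map (fun p => (p.1, p.2 - 1))

-- ===== PRECONDITION & SPEC =====
def Spec_labels_to_segments (labels : List Int) (out : List (Int × Int)) : Prop := out = labels_to_segments_alt labels
instance (labels : List Int) (out : List (Int × Int)) : Decidable (Spec_labels_to_segments labels out) := by unfold Spec_labels_to_segments; infer_instance

-- ===== CLAIM (what is proved, stated in full; the proofs are below) =====
def Claim_equal_labels_to_segments : Prop := ∀ (labels : List Int), Dom_labels_to_segments labels → Spec_labels_to_segments labels (labels_to_segments labels)

-- ===== LEMMAS AND PROOFS =====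

-- common recursive form: segments from a list of start indices and the length n
def segF : List Int → Int → List (Int × Int)
  | [], _ => []
  | [s], n => [(s, n - 1)]
  | s :: s' :: r, n => (s, s' - 1) :: segF (s' :: r) n

theorem foldA (labels : List Int) (n : Int) :
    ∀ (l : List Int) (segs : List (Int × Int)) (s : Int),
      (let p := l.foldl
        (fun (st : List (Int × Int) × Int) i =>
          if PySem.List.pyGet? labels i == some 1 then (st.1 ++ [(st.2, i - 1)], i) else st)
        (segs, s)
       p.1 ++ [(p.2, n - 1)]) =
      segs ++ segF (s :: l.filter (fun i => PySem.List.pyGet? labels i == some 1)) n := by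
  intro l
  induction l with
  | nil => intro segs s; simp [segF]
  | cons i t ih =>
    intro segs s
    by_cases h : PySem.List.pyGet? labels i == some 1
    · simp only [List.foldl_cons, List.filter_cons, h, if_pos, ih]
      simp [segF]
    · simp only [List.foldl_cons, List.filter_cons, h, ih]
      simp

theorem zipB (n : Int) :
    ∀ (starts : List Int),
      ((starts.zip (starts.drop 1 ++ [n])).map (fun p => (p.1, p.2 - 1))) = segF starts n := by
  intro starts
  induction starts with
  | nil => simp [segF]
  | cons s r ih =>
    cases r with
    | nil => simp [segF]
    | cons s' r' =>
      simp only [segF, List.drop_succ_cons, List.drop_zero, List.cons_append, List.zip_cons_cons,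
        List.map_cons]
      simpa using ih

-- ===== VERDICT (by name: the statement is the Claim_ definition above) =====
theorem labels_to_segments_spec : Claim_equal_labels_to_segments := by
  intro labels _
  unfold Spec_labels_to_segments labels_to_segments labels_to_segments_alt
  rw [zipB, foldA]
  simp
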